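-- pv_equiv track=rewrite | github.com/malav-spec/BinaryConverter | Hexadecmial.py | get_four
-- ===== SOURCE A (Python) =====
-- def get_four(number):
--     count = 0
--     i = 0
--     sum = 0
--
--     while count != 4:
--         rem = number % 10
--         sum = sum + pow(10, i) * (rem)
--         i += 1
--         number = number // 10
--         count += 1
--
--     return sum, number
-- ===== SOURCE B (Python) =====
-- def get_four(number):
--     return number % 10000, number // 10000
-- ===== Notes on version B (the rewrite author's own statement) =====
-- stated objective: simpler
-- what changed: Replaces the digit-by-digit while loop, which accumulates pow-weighted remainders over four iterations, with a single closed-form modulo and floor-division by ten thousand.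
import Mathlib
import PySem

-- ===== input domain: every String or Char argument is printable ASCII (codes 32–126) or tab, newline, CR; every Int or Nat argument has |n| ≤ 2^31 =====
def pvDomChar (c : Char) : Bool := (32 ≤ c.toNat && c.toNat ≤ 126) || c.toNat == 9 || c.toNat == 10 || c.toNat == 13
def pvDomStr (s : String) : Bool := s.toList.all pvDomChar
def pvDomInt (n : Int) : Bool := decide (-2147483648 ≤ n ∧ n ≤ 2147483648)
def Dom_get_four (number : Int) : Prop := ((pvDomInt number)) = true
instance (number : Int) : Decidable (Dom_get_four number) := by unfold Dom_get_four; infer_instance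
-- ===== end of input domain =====

-- B replaces A's 4-iteration digit-accumulating while loop with one closed-form % / // pair by 10000 (simpler).

-- ===== PORT A =====
-- while count != 4: the loop runs exactly 4 times from count = 0; fuel (4) only makes the recursion total
def get_fourGo (fuel : Nat) (count : Int) (i : Nat) (sum : Int) (number : Int) : Int × Int :=
  match fuel with
  | 0 => (sum, number)
  | fuel' + 1 =>
    if count ≠ 4 then
      let rem := PySem.Int.mod number 10
      get_fourGo fuel' (count + 1) (i + 1) (sum + 10 ^ i * rem) (PySem.Int.floordiv number 10)
    else (sum, number)

def get_four (number : Int) : Int × Int := get_fourGo 4 0 0 0 number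

-- ===== PORT B =====
def get_four_alt (number : Int) : Int × Int :=
  (PySem.Int.mod number 10000, PySem.Int.floordiv number 10000)

-- ===== PRECONDITION & SPEC =====
def Spec_get_four (number : Int) (out : Int × Int) : Prop := out = get_four_alt number
instance (number : Int) (out : Int × Int) : Decidable (Spec_get_four number out) := by unfold Spec_get_four; infer_instance

-- ===== CLAIM (what is proved, stated in full; the proofs are below) =====
def Claim_equal_get_four : Prop := ∀ (number : Int), Dom_get_four number → Spec_get_four number (get_four number)

-- ===== LEMMAS AND PROOFS =====

-- ===== VERDICT (by name: the statement is the Claim_ definition above) =====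
theorem get_four_spec : Claim_equal_get_four := by
  intro n _
  unfold Spec_get_four get_four get_four_alt
  norm_num [get_fourGo, PySem.Int.mod_eq_emod_of_pos (show (0:Int) < 10 by norm_num),
    PySem.Int.floordiv_eq_ediv_of_pos (show (0:Int) < 10 by norm_num),
    PySem.Int.mod_eq_emod_of_pos (show (0:Int) < 10000 by norm_num),
    PySem.Int.floordiv_eq_ediv_of_pos (show (0:Int) < 10000 by norm_num)]
  constructor <;> omega
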